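-- pv_equiv track=rewrite | github.com/Minibruks/app_with_differents_tests | project_intro.py | space_count
-- ===== SOURCE A (Python) =====
-- def space_count(s):
--     count = 0
--     for elem in s[::-1]:
--         if elem == ' ':
--             count += 1
--         else:
--             return count
--     return count
-- ===== SOURCE B (Python) =====
-- def space_count(s):
--     return len(s) - len(s.rstrip(' '))
-- ===== Notes on version B (the rewrite author's own statement) =====
-- stated objective: simpler
-- what changed: Replaces the reversed-string loop with a counter and early return by a closed form: strip the trailing run of space characters once via str.rstrip with an explicit space-only argument and return the length difference; no loop or branch remains in B's own code.
import Mathlib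
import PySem

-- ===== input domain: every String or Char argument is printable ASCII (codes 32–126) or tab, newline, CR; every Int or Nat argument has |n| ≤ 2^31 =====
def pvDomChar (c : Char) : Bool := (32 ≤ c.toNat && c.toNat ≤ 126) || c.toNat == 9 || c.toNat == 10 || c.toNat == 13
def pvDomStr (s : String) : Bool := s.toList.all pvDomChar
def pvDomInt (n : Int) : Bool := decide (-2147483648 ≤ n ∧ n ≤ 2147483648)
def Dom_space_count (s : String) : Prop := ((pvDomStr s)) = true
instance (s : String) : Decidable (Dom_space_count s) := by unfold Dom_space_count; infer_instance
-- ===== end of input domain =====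

-- B computes the count in closed form as len(s) - len(s.rstrip(' ')) instead of A's reversed loop with early return.

-- ===== PORT A =====
-- for elem in s[::-1]: count spaces, early return on the first non-space
def spaceCountLoop : List Char → Int → Int
  | [], count => count
  | c :: rest, count => if c == ' ' then spaceCountLoop rest (count + 1) else count

def space_count (s : String) : Int :=
  spaceCountLoop ((PySem.List.slice? s.toList none none (-1)).getD []) 0

-- ===== PORT B =====
-- s.rstrip(' ') ported by hand (exact): remove the maximal run of trailing ' ' chars
def space_count_alt (s : String) : Int :=
  (PySem.Str.len s : Int) - ((s.toList.reverse.dropWhile (· == ' ')).reverse.length : Int)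

-- ===== PRECONDITION & SPEC =====
def Spec_space_count (s : String) (out : Int) : Prop := out = space_count_alt s
instance (s : String) (out : Int) : Decidable (Spec_space_count s out) := by unfold Spec_space_count; infer_instance

-- ===== CLAIM (what is proved, stated in full; the proofs are below) =====
def Claim_equal_space_count : Prop := ∀ (s : String), Dom_space_count s → Spec_space_count s (space_count s)

-- ===== LEMMAS AND PROOFS =====
theorem spaceCountLoop_eq_takeWhile (r : List Char) (c : Int) :
    spaceCountLoop r c = c + (r.takeWhile (· == ' ')).length := by
  induction r generalizing c with
  | nil => simp [spaceCountLoop]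
  | cons x rest ih =>
    by_cases h : x = ' '
    · simp [spaceCountLoop, h, List.takeWhile_cons, ih]; ring
    · simp [spaceCountLoop, h, List.takeWhile_cons]

theorem takeWhile_add_dropWhile_length (r : List Char) (p : Char → Bool) :
    (r.takeWhile p).length + (r.dropWhile p).length = r.length := by
  conv_rhs => rw [← List.takeWhile_append_dropWhile (p := p) (l := r)]
  rw [List.length_append]

-- ===== VERDICT (by name: the statement is the Claim_ definition above) =====
theorem space_count_spec : Claim_equal_space_count := by
  intro s _
  unfold Spec_space_count space_count space_count_alt
  rw [PySem.List.slice?_none_none_neg_one]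
  simp only [Option.getD_some, spaceCountLoop_eq_takeWhile, PySem.Str.len_eq,
    List.length_reverse]
  have h := takeWhile_add_dropWhile_length s.toList.reverse (· == ' ')
  have hl : s.toList.reverse.length = s.toList.length := List.length_reverse
  omega
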